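-- pv_equiv track=rewrite | github.com/windbell0711/BingGo | config.py | lineup_to_fen
-- ===== SOURCE A (Python) =====
-- typ_str2fsf = {
--     "R": "r",
--     "N": "n",
--     "B": "b",
--     "Q": "q",
--     "K": "k",
--     "P": "p",
--     "c": "R",
--     "x": "X",
--     "s": "S",
--     "m": "M",
--     "p": "L",
--     "b": "O",
--     "w": "W",
--     "j": "J"
--
-- }
--
-- ALL_PIECE_TYPES = 'jcmxspwbRNBQKP'
--
-- def lineup_to_fen(lineup: str) -> str:
--     """布局字符串转化为FEN"""
--     fen = ""
--     space = 0
--     for i in range(1, len(lineup)):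
--         if lineup[i] == " ":
--             space += 1
--         else:
--             if space != 0:
--                 fen += str(space)
--                 space = 0
--             if lineup[i] in ALL_PIECE_TYPES:
--                 fen += typ_str2fsf[lineup[i]]
--             elif lineup[i].isdigit():
--                 fen += lineup[i]
--             elif lineup[i] == "|":
--                 fen += "/"
--     return fen[:-1]
-- ===== SOURCE B (Python) =====
-- typ_str2fsf = {
--     "R": "r", "N": "n", "B": "b", "Q": "q", "K": "k", "P": "p",
--     "c": "R", "x": "X", "s": "S", "m": "M", "p": "L", "b": "O",
--     "w": "W", "j": "J",
-- }
--
-- ALL_PIECE_TYPES = 'jcmxspwbRNBQKP'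
--
--
-- def _emit(ch):
--     if ch in ALL_PIECE_TYPES:
--         return typ_str2fsf[ch]
--     if ch.isdigit():
--         return ch
--     if ch == "|":
--         return "/"
--     return ""
--
--
-- def lineup_to_fen(lineup: str) -> str:
--     """Index/gap rewrite: find the positions of all non-space characters first,
--     then derive each space-run length as the difference of consecutive positions
--     (no streaming space counter; trailing spaces contribute no position)."""
--     idxs = [i for i in range(1, len(lineup)) if lineup[i] != " "]
--     parts = []
--     prev = 0
--     for i in idxs:
--         gap = i - prev - 1
--         if gap > 0:
--             parts.append(str(gap))
--         parts.append(_emit(lineup[i]))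
--         prev = i
--     return "".join(parts)[:-1]
-- ===== Notes on version B (the rewrite author's own statement) =====
-- stated objective: alternative
-- what changed: B first collects the positions of all non-space characters in one comprehension pass and then reconstructs each space-run length arithmetically as the difference of consecutive positions, instead of A's single streaming scan with a lazily flushed space counter.
import Mathlib
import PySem

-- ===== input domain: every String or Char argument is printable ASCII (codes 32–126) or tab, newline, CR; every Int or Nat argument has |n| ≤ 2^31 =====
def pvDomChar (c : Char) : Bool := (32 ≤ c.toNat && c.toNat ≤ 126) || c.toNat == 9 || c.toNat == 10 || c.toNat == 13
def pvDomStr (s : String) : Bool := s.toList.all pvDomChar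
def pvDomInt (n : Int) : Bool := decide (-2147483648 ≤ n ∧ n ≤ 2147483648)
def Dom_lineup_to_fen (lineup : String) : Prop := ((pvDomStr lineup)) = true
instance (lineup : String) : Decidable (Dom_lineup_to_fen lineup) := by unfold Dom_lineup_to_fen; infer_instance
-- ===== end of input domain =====

-- B replaces A's streaming space counter by first collecting non-space positions and deriving space runs as position differences (alternative decomposition); same exact output.

-- module constants shared by A and B (from the Python module)
def typ_str2fsf : PySem.Dict Char (List Char) := PySem.Dict.ofList
  [('R', ['r']), ('N', ['n']), ('B', ['b']), ('Q', ['q']), ('K', ['k']), ('P', ['p']),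
   ('c', ['R']), ('x', ['X']), ('s', ['S']), ('m', ['M']), ('p', ['L']), ('b', ['O']),
   ('w', ['W']), ('j', ['J'])]

def ALL_PIECE_TYPES : List Char := "jcmxspwbRNBQKP".toList

-- ===== PORT A =====
-- one iteration of A's for-loop; state = (fen so far, space counter)
def stepA (st : List Char × Int) (c : Char) : List Char × Int :=
  if c == ' ' then (st.1, st.2 + 1)
  else
    let fen := if st.2 ≠ 0 then st.1 ++ PySem.Int.toChars st.2 else st.1
    let fen :=
      if ALL_PIECE_TYPES.contains c then fen ++ typ_str2fsf.getD c []   -- membership test guards the dict lookup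
      else if PySem.Chars.isdigit c then fen ++ [c]
      else if c == '|' then fen ++ ['/']
      else fen
    (fen, 0)

def lineup_to_fen (lineup : String) : String :=
  String.mk (((lineup.toList.drop 1).foldl stepA ([], 0)).1.dropLast)   -- fen[:-1]

-- ===== PORT B =====
-- _emit helper of Source B
def emitB (c : Char) : List Char :=
  if ALL_PIECE_TYPES.contains c then typ_str2fsf.getD c []
  else if PySem.Chars.isdigit c then [c]
  else if c == '|' then ['/']
  else []

-- "[i for i in range(1, len(lineup)) if lineup[i] != ' ']"; the index is always in range, so pyGetD is exact
def idxsB (cs : List Char) : List Int :=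
  (PySem.List.pyRange 1 cs.length 1).filter (fun i => PySem.List.pyGetD cs i ' ' != ' ')

-- body of B's for-loop; state = (parts joined, prev)
def stepB (cs : List Char) (st : List Char × Int) (i : Int) : List Char × Int :=
  let gap := i - st.2 - 1
  let parts := if gap > 0 then st.1 ++ PySem.Int.toChars gap else st.1
  (parts ++ emitB (PySem.List.pyGetD cs i ' '), i)

def lineup_to_fen_alt (lineup : String) : String :=
  String.mk (((idxsB lineup.toList).foldl (stepB lineup.toList) ([], 0)).1.dropLast)

-- ===== PRECONDITION & SPEC =====
def Spec_lineup_to_fen (lineup : String) (out : String) : Prop := out = lineup_to_fen_alt lineup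
instance (lineup : String) (out : String) : Decidable (Spec_lineup_to_fen lineup out) := by unfold Spec_lineup_to_fen; infer_instance

-- ===== CLAIM (what is proved, stated in full; the proofs are below) =====
def Claim_equal_lineup_to_fen : Prop := ∀ (lineup : String), Dom_lineup_to_fen lineup → Spec_lineup_to_fen lineup (lineup_to_fen lineup)

-- ===== LEMMAS AND PROOFS =====

lemma stepA_space (st : List Char × Int) : stepA st ' ' = (st.1, st.2 + 1) := rfl

lemma stepA_nonspace (acc : List Char) (sp : Int) (c : Char) (h : ¬ c == ' ') :
    stepA (acc, sp) c =
      ((if sp ≠ 0 then acc ++ PySem.Int.toChars sp else acc) ++ emitB c, 0) := by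
  simp only [stepA, emitB, h]
  split_ifs <;> simp_all

-- the filtered index list of B, restricted to positions ≥ p
def idxsFrom (cs : List Char) (p : ℕ) : List Int :=
  (PySem.List.pyRange p cs.length 1).filter (fun i => PySem.List.pyGetD cs i ' ' != ' ')

lemma idxsFrom_ge (cs : List Char) (p : ℕ) (hp : cs.length ≤ p) : idxsFrom cs p = [] := by
  unfold idxsFrom
  rw [PySem.List.pyRange_one_eq_nil (by exact_mod_cast hp)]
  rfl

lemma idxsFrom_lt (cs : List Char) (p : ℕ) (hp : p < cs.length) :
    idxsFrom cs p =
      if cs[p] == ' ' then idxsFrom cs (p + 1)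
      else (p : Int) :: idxsFrom cs (p + 1) := by
  unfold idxsFrom
  rw [PySem.List.pyRange_one_cons (by exact_mod_cast hp)]
  have hg : PySem.List.pyGetD cs (p : Int) ' ' = cs[p] := by
    simp [List.getD, hp]
  by_cases hc : cs[p] = ' ' <;> simp [hg, hc]

-- main invariant: A's fold over the suffix from p with space counter sp equals
-- B's fold over the non-space indices ≥ p with prev = p - sp - 1
lemma inv (cs : List Char) : ∀ (k p sp : ℕ) (acc : List Char), cs.length - p = k →
    ((cs.drop p).foldl stepA (acc, (sp : Int))).1
      = ((idxsFrom cs p).foldl (stepB cs) (acc, (p : Int) - sp - 1)).1 := by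
  intro k
  induction k with
  | zero =>
      intro p sp acc h
      have hp : cs.length ≤ p := by omega
      rw [List.drop_eq_nil_of_le hp, idxsFrom_ge cs p hp]
      rfl
  | succ n ih =>
      intro p sp acc h
      have hp : p < cs.length := by omega
      rw [List.drop_eq_getElem_cons hp, List.foldl_cons]
      by_cases hc : cs[p] == ' '
      · have hc' : cs[p] = ' ' := by simpa using hc
        rw [hc', stepA_space, idxsFrom_lt cs p hp, if_pos hc]
        have : ((sp : Int) + 1) = ((sp + 1 : ℕ) : Int) := by push_cast; ring_nf
        rw [this, ih (p + 1) (sp + 1) acc (by omega)]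
        congr 2
        push_cast; ring_nf
      · rw [stepA_nonspace acc (sp : Int) cs[p] hc, idxsFrom_lt cs p hp, if_neg hc,
            List.foldl_cons]
        have hg : PySem.List.pyGetD cs (p : Int) ' ' = cs[p] := by
          simp [List.getD, hp]
        have hstep : stepB cs (acc, (p : Int) - sp - 1) (p : Int) =
            ((if (sp : Int) ≠ 0 then acc ++ PySem.Int.toChars sp else acc) ++ emitB cs[p],
             (p : Int)) := by
          simp only [stepB, hg]
          have hgap : (p : Int) - ((p : Int) - sp - 1) - 1 = sp := by ring
          rw [hgap]
          have hiff : ((sp : Int) > 0) ↔ ((sp : Int) ≠ 0) := by omega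
          simp only [hiff]
        rw [hstep]
        have := ih (p + 1) 0 ((if (sp : Int) ≠ 0 then acc ++ PySem.Int.toChars sp else acc)
            ++ emitB cs[p]) (by omega)
        simp only [Nat.cast_zero] at this ⊢
        rw [this]
        congr 2
        push_cast; ring_nf

-- ===== VERDICT (by name: the statement is the Claim_ definition above) =====
theorem lineup_to_fen_spec : Claim_equal_lineup_to_fen := by
  intro lineup _
  unfold Spec_lineup_to_fen lineup_to_fen lineup_to_fen_alt
  have h := inv lineup.toList (lineup.toList.length - 1) 1 0 [] rfl
  simp only [Nat.cast_zero, Nat.cast_one] at h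
  rw [h]
  rfl
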